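-- pv_equiv track=rewrite | github.com/ryaneijae/advent | 2024/day02_RedNosedReports/part1.py | check
-- ===== SOURCE A (Python) =====
-- def check(l): # if safe, return True. Else, return False
--     if len(set(l)) != len(l):
--         return False
--     if sorted(l) != l and sorted(l) != l[::-1]:
--         return False
--     for i in range(len(l) - 1):
--         if abs(l[i] - l[i + 1]) > 3:
--             return False
--     return True
-- ===== SOURCE B (Python) =====
-- def check(l): # if safe, return True. Else, return False
--     if len(l) < 2:
--         return True
--     d0 = l[1] - l[0]
--     if not (1 <= abs(d0) <= 3):
--         return False
--     s = 1 if d0 > 0 else -1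
--     for a, b in zip(l, l[1:]):
--         d = (b - a) * s
--         if not (1 <= d <= 3):
--             return False
--     return True
-- ===== Notes on version B (the rewrite author's own statement) =====
-- stated objective: faster
-- what changed: Replaced A's set-materialisation plus two full sorts plus an index loop by a single linear pass that fixes the direction from the first pair and checks every adjacent difference d satisfies 1 <= d*s <= 3.
import Mathlib
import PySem

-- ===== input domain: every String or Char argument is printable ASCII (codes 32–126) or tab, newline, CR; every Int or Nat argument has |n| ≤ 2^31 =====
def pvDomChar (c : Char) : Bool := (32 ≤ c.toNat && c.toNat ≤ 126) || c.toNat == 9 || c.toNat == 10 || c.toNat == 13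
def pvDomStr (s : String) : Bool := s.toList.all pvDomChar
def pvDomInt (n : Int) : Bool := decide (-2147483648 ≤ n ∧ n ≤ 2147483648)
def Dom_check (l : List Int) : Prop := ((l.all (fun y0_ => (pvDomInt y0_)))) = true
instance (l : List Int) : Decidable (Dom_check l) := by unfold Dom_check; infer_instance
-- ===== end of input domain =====

-- B replaces A's set build + two sorts + index loop by one linear pass over adjacent pairs (direction fixed by the first pair, each diff checked against 1..3): faster.

-- ===== PORT A =====
def check (l : List Int) : Bool :=
  if (PySem.Set.ofList l).length ≠ l.length then false
  else if PySem.List.sorted l (fun x => x) ≠ l ∧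
          PySem.List.sorted l (fun x => x) ≠ (PySem.List.slice? l none none (-1)).getD [] then false
  else
    (PySem.List.pyRange 0 ((l.length : Int) - 1) 1).all
      (fun i => !decide (3 < (PySem.List.pyGetD l i 0 - PySem.List.pyGetD l (i + 1) 0).natAbs))

-- ===== PORT B =====
def check_alt (l : List Int) : Bool :=
  if l.length < 2 then true
  else
    let d0 : Int := PySem.List.pyGetD l 1 0 - PySem.List.pyGetD l 0 0
    if !decide (1 ≤ d0.natAbs ∧ d0.natAbs ≤ 3) then false
    else
      let s : Int := if 0 < d0 then 1 else -1
      (l.zip (PySem.List.slice l (some 1) none)).all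
        (fun p => decide (1 ≤ (p.2 - p.1) * s ∧ (p.2 - p.1) * s ≤ 3))

-- ===== PRECONDITION & SPEC =====
def Spec_check (l : List Int) (out : Bool) : Prop := out = check_alt l
instance (l : List Int) (out : Bool) : Decidable (Spec_check l out) := by unfold Spec_check; infer_instance

-- ===== CLAIM (what is proved, stated in full; the proofs are below) =====
def Claim_equal_check : Prop := ∀ (l : List Int), Dom_check l → Spec_check l (check l)

-- ===== LEMMAS AND PROOFS =====

/-- "safe ascending" adjacent relation -/
def pvUp (a b : Int) : Prop := 1 ≤ b - a ∧ b - a ≤ 3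
/-- "safe descending" adjacent relation -/
def pvDn (a b : Int) : Prop := -3 ≤ b - a ∧ b - a ≤ -1

theorem zipAll_isChain (P : Int × Int → Bool) :
    (l : List Int) → (((l.zip l.tail).all P = true)
      ↔ List.IsChain (fun a b => P (a, b) = true) l)
  | [] => by simp
  | [a] => by simp
  | a :: b :: t => by
    have ih := zipAll_isChain P (b :: t)
    simp only [List.tail_cons, List.zip_cons_cons, List.all_cons, Bool.and_eq_true,
      List.isChain_cons_cons] at ih ⊢
    rw [ih]

lemma ofList_len_iff (l : List Int) :
    (PySem.Set.ofList l).length = l.length ↔ l.Nodup := by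
  have hperm : (PySem.Set.ofList l).Perm l.dedup := by
    rw [List.perm_ext_iff_of_nodup (PySem.Set.nodup_ofList l) l.nodup_dedup]
    intro x; simp [PySem.Set.mem_ofList, List.mem_dedup]
  constructor
  · intro h
    have hlen : l.dedup.length = l.length := by rw [← hperm.length_eq, h]
    exact List.dedup_eq_self.mp (l.dedup_sublist.eq_of_length hlen)
  · intro h
    rw [hperm.length_eq, List.dedup_eq_self.mpr h]

lemma sorted_eq_self_iff (l : List Int) (h : l.Nodup) :
    PySem.List.sorted l (fun x => x) = l ↔ l.Pairwise (· < ·) := by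
  constructor
  · intro he
    have hp := PySem.List.sorted_pairwise l (fun x => x)
    rw [he] at hp
    exact (hp.and h).imp (fun hab => lt_of_le_of_ne hab.1 hab.2)
  · intro hp
    exact PySem.List.sorted_eq_of_perm_of_pairwise_lt l l (fun x => x) (List.Perm.refl l) hp

lemma sorted_eq_rev_iff (l : List Int) (h : l.Nodup) :
    PySem.List.sorted l (fun x => x) = l.reverse ↔ l.Pairwise (· > ·) := by
  constructor
  · intro he
    have hp := PySem.List.sorted_pairwise l (fun x => x)
    rw [he, List.pairwise_reverse] at hp
    exact (hp.and h).imp (fun hab => lt_of_le_of_ne hab.1 (Ne.symm hab.2))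
  · intro hp
    refine PySem.List.sorted_eq_of_perm_of_pairwise_lt l l.reverse (fun x => x) l.reverse_perm ?_
    rw [List.pairwise_reverse]
    exact hp

lemma loopA_iff (l : List Int) :
    ((PySem.List.pyRange 0 ((l.length : Int) - 1) 1).all
      (fun i => !decide (3 < (PySem.List.pyGetD l i 0 - PySem.List.pyGetD l (i + 1) 0).natAbs)) = true)
      ↔ List.IsChain (fun a b => (b - a).natAbs ≤ 3) l := by
  rw [List.all_eq_true, List.isChain_iff_getElem]
  constructor
  · intro h i hi
    have hm : ((i : Int)) ∈ PySem.List.pyRange 0 ((l.length : Int) - 1) 1 :=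
      PySem.List.mem_pyRange_one.mpr ⟨by omega, by omega⟩
    have hh := h _ hm
    rw [show ((i : Int) + 1) = ((i + 1 : Nat) : Int) by push_cast; ring] at hh
    rw [PySem.List.pyGetD_natCast, PySem.List.pyGetD_natCast,
        List.getD_eq_getElem l 0 (by omega), List.getD_eq_getElem l 0 (by omega)] at hh
    simp only [Bool.not_eq_true', decide_eq_false_iff_not, not_lt] at hh
    omega
  · intro h i hm
    have hr := PySem.List.mem_pyRange_one.mp hm
    obtain ⟨n, rfl⟩ := Int.eq_ofNat_of_zero_le hr.1
    rw [show ((n : Int) + 1) = ((n + 1 : Nat) : Int) by push_cast; ring]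
    rw [PySem.List.pyGetD_natCast, PySem.List.pyGetD_natCast,
        List.getD_eq_getElem l 0 (by omega), List.getD_eq_getElem l 0 (by omega)]
    simp only [Bool.not_eq_true', decide_eq_false_iff_not, not_lt]
    have := h n (by omega)
    omega

lemma A_iff (l : List Int) :
    check l = true ↔ (List.IsChain pvUp l ∨ List.IsChain pvDn l) := by
  have hrev : (PySem.List.slice? l none none (-1)).getD [] = l.reverse := by
    rw [PySem.List.slice?_none_none_neg_one]; rfl
  have hup_pw : List.IsChain pvUp l → l.Pairwise (· < ·) := fun hc =>
    List.isChain_iff_pairwise.mp (hc.imp (fun {a b} hab => by unfold pvUp at hab; omega))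
  have hdn_pw : List.IsChain pvDn l → l.Pairwise (· > ·) := fun hc =>
    List.isChain_iff_pairwise.mp (hc.imp (fun {a b} hab => by unfold pvDn at hab; omega))
  have hup_nd : List.IsChain pvUp l → l.Nodup := fun hc => (hup_pw hc).imp ne_of_lt
  have hdn_nd : List.IsChain pvDn l → l.Nodup := fun hc => (hdn_pw hc).imp ne_of_gt
  unfold check
  simp only [hrev]
  split_ifs with h1 h2
  · simp only [false_iff]
    rintro (hc | hc)
    · exact h1 ((ofList_len_iff l).mpr (hup_nd hc))
    · exact h1 ((ofList_len_iff l).mpr (hdn_nd hc))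
  · simp only [false_iff]
    have hnd : l.Nodup := (ofList_len_iff l).mp (not_ne_iff.mp h1)
    rintro (hc | hc)
    · exact h2.1 ((sorted_eq_self_iff l hnd).mpr (hup_pw hc))
    · exact h2.2 ((sorted_eq_rev_iff l hnd).mpr (hdn_pw hc))
  · rw [loopA_iff]
    have hnd : l.Nodup := (ofList_len_iff l).mp (not_ne_iff.mp h1)
    rw [not_and_or, not_ne_iff, not_ne_iff] at h2
    constructor
    · intro habs
      rcases h2 with hs | hs
      · left
        have hpw := (sorted_eq_self_iff l hnd).mp hs
        rw [List.isChain_iff_getElem] at habs ⊢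
        rw [List.pairwise_iff_getElem] at hpw
        intro i hi
        have ha := hpw i (i + 1) (by omega) hi (by omega)
        have hb := habs i hi
        unfold pvUp
        omega
      · right
        have hpw := (sorted_eq_rev_iff l hnd).mp hs
        rw [List.isChain_iff_getElem] at habs ⊢
        rw [List.pairwise_iff_getElem] at hpw
        intro i hi
        have ha := hpw i (i + 1) (by omega) hi (by omega)
        have hb := habs i hi
        unfold pvDn
        simp only [gt_iff_lt] at ha
        omega
    · rintro (hc | hc)
      · exact hc.imp (fun {a b} hab => by unfold pvUp at hab; omega)
      · exact hc.imp (fun {a b} hab => by unfold pvDn at hab; omega)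

lemma B_iff (l : List Int) :
    check_alt l = true ↔ (List.IsChain pvUp l ∨ List.IsChain pvDn l) := by
  unfold check_alt
  match l with
  | [] => simp
  | [a] => simp
  | a :: b :: t =>
    rw [if_neg (by simp)]
    have hget1 : PySem.List.pyGetD (a :: b :: t) 1 0 = b := by simp [pysem]
    have hget0 : PySem.List.pyGetD (a :: b :: t) 0 0 = a := by simp [pysem]
    simp only [hget1, hget0, PySem.List.slice_from_one]
    split_ifs with hg hd
    · -- guard failed: |b - a| outside 1..3, so neither chain can hold
      simp only [Bool.not_eq_true', decide_eq_false_iff_not, not_and, not_le] at hg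
      simp only [false_iff]
      rintro (hc | hc)
      · have := (List.isChain_cons_cons.mp hc).1
        unfold pvUp at this; omega
      · have := (List.isChain_cons_cons.mp hc).1
        unfold pvDn at this; omega
    · -- ascending direction: s = 1
      have hfun : (fun p : Int × Int => decide (1 ≤ (p.2 - p.1) * 1 ∧ (p.2 - p.1) * 1 ≤ 3))
          = (fun p : Int × Int => decide (1 ≤ p.2 - p.1 ∧ p.2 - p.1 ≤ 3)) := by
        funext p; rw [mul_one]
      rw [hfun, zipAll_isChain,
          List.IsChain.iff (S := pvUp) (fun x y => by simp [pvUp])]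
      constructor
      · exact Or.inl
      · rintro (hc | hc)
        · exact hc
        · exfalso
          have := (List.isChain_cons_cons.mp hc).1
          unfold pvDn at this
          omega
    · -- descending direction: s = -1
      have hfun : (fun p : Int × Int => decide (1 ≤ (p.2 - p.1) * (-1) ∧ (p.2 - p.1) * (-1) ≤ 3))
          = (fun p : Int × Int => decide (-3 ≤ p.2 - p.1 ∧ p.2 - p.1 ≤ -1)) := by
        funext p; exact decide_eq_decide.mpr (by omega)
      rw [hfun, zipAll_isChain,
          List.IsChain.iff (S := pvDn) (fun x y => by simp [pvDn])]
      constructor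
      · exact Or.inr
      · rintro (hc | hc)
        · exfalso
          have := (List.isChain_cons_cons.mp hc).1
          unfold pvUp at this
          omega
        · exact hc

-- ===== VERDICT (by name: the statement is the Claim_ definition above) =====
theorem check_spec : Claim_equal_check := by
  intro l _
  unfold Spec_check
  have h := (A_iff l).trans (B_iff l).symm
  cases hA : check l <;> cases hB : check_alt l <;> simp_all
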